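-- pv_equiv track=rewrite | github.com/LukaAvbreht/Social_graphs | project/utils_sg.py | cumulative_frequency
-- ===== SOURCE A (Python) =====
-- def cumulative_frequency(text, words_num=75):
--     all_words = list(set(text))
--     res = list()
--     for word in all_words:
--         res.append((text.count(word), word))
--
--     res.sort(reverse=True)
--     rres = list()
--     suma = 0
--     for (i, word) in res:
--         suma += i
--         rres.append(suma)
--     return rres[:words_num]
-- ===== SOURCE B (Python) =====
-- def cumulative_frequency(text, words_num=75):
--     # Counting-sort by frequency: bucket the word counts into a histogram and
--     # walk the buckets from the highest frequency down, accumulating the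
--     # running total directly -- no comparison sort at all.
--     counts = {}
--     for word in text:
--         counts[word] = counts.get(word, 0) + 1
--     hist = {}
--     maxc = 0
--     for c in counts.values():
--         hist[c] = hist.get(c, 0) + 1
--         if c > maxc:
--             maxc = c
--     out = []
--     total = 0
--     for c in range(maxc, 0, -1):
--         for _ in range(hist.get(c, 0)):
--             total += c
--             out.append(total)
--     return out[:words_num]
-- ===== Notes on version B (the rewrite author's own statement) =====
-- stated objective: faster
-- what changed: B counts words in one dict pass and then counting-sorts the frequencies (a histogram of counts walked from the maximum count downward) while accumulating the running sums on the fly, instead of A's set + per-word text.count scan followed by a comparison sort of (count, word) pairs and a separate prefix-sum pass.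
import Mathlib
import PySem

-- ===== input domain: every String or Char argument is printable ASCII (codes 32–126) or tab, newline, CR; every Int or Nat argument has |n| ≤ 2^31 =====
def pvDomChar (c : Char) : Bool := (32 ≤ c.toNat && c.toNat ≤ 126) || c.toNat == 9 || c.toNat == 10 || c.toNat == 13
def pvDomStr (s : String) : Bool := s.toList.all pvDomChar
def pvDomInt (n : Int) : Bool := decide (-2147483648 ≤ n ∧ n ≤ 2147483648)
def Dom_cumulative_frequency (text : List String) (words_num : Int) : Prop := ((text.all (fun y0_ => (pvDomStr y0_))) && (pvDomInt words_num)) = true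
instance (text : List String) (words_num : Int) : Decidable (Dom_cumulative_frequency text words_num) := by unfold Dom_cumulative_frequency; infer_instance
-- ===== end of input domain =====

-- B replaces A's set + per-word text.count scan and comparison sort of (count, word) pairs
-- by a one-pass counter dict and a counting sort of the frequencies (histogram of counts
-- walked from the maximum downward) with the running sums accumulated on the fly: faster.


-- ===== PORT A =====
def cumulative_frequency (text : List String) (words_num : Int) : List Int :=
  let all_words := PySem.Set.ofList text
  let res := all_words.foldl
    (fun acc word => acc ++ [((PySem.List.count text word : Int), word)]) []
  -- res.sort(reverse=True): Python tuple comparison = lexicographic on (Int, String)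
  let res := PySem.List.sorted res (fun p => toLex p) true
  let fin := res.foldl
    (fun (st : Int × List Int) p => (st.1 + p.1, st.2 ++ [st.1 + p.1])) ((0 : Int), ([] : List Int))
  PySem.List.slice fin.2 none (some words_num)

-- ===== PORT B =====
def cumulative_frequency_alt (text : List String) (words_num : Int) : List Int :=
  let counts := text.foldl (fun d w => d.insert w (d.getD w 0 + 1)) PySem.Dict.empty
  let hm := counts.values.foldl
    (fun (st : PySem.Dict Int Int × Int) c =>
      (st.1.insert c (st.1.getD c 0 + 1), if c > st.2 then c else st.2))
    (PySem.Dict.empty, (0 : Int))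
  let fin := (PySem.List.pyRange hm.2 0 (-1)).foldl
    (fun (st : Int × List Int) c =>
      (PySem.List.pyRange 0 (hm.1.getD c 0) 1).foldl
        (fun (st2 : Int × List Int) _ => (st2.1 + c, st2.2 ++ [st2.1 + c])) st)
    ((0 : Int), ([] : List Int))
  PySem.List.slice fin.2 none (some words_num)

-- ===== PRECONDITION & SPEC =====
def Spec_cumulative_frequency (text : List String) (words_num : Int) (out : List Int) : Prop := out = cumulative_frequency_alt text words_num
instance (text : List String) (words_num : Int) (out : List Int) : Decidable (Spec_cumulative_frequency text words_num out) := by unfold Spec_cumulative_frequency; infer_instance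

-- ===== CLAIM (what is proved, stated in full; the proofs are below) =====
def Claim_equal_cumulative_frequency : Prop := ∀ (text : List String) (words_num : Int), Dom_cumulative_frequency text words_num → Spec_cumulative_frequency text words_num (cumulative_frequency text words_num)

-- ===== LEMMAS AND PROOFS =====

-- descending prefix-sum list, the common shape of both final loops
def pvScan (s : Int) : List Int → List Int
  | [] => []
  | c :: l => (s + c) :: pvScan (s + c) l

theorem pvScan_foldl_pairs (l : List (Int × String)) (s : Int) (acc : List Int) :
    (l.foldl (fun (st : Int × List Int) p => (st.1 + p.1, st.2 ++ [st.1 + p.1])) (s, acc)).2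
      = acc ++ pvScan s (l.map Prod.fst) := by
  induction l generalizing s acc with
  | nil => simp [pvScan]
  | cons p l ih => simp [pvScan, ih]

theorem pvScan_foldl_ints (l : List Int) (s : Int) (acc : List Int) :
    (l.foldl (fun (st : Int × List Int) c => (st.1 + c, st.2 ++ [st.1 + c])) (s, acc))
      = (s + l.sum, acc ++ pvScan s l) := by
  induction l generalizing s acc with
  | nil => simp [pvScan]
  | cons c l ih => simp [pvScan, ih]; ring

-- a loop that ignores its iteration variable is a loop over a replicate
theorem foldl_ignore_eq_replicate {α β : Type} (l : List β) (g : α → Int → α) (c : Int) (st : α) :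
    l.foldl (fun s _ => g s c) st = (List.replicate l.length c).foldl g st := by
  induction l generalizing st with
  | nil => rfl
  | cons b l ih => simp [List.replicate_succ, ih]

-- a fold whose body is itself a fold over f c is a fold over the flatMap
theorem foldl_block_flatMap {α : Type} (cs : List Int) (f : Int → List Int)
    (g : α → Int → α) (st : α) :
    cs.foldl (fun st c => (f c).foldl g st) st = (cs.flatMap f).foldl g st := by
  induction cs generalizing st with
  | nil => rfl
  | cons c cs ih => simp [List.flatMap_cons, List.foldl_append, ih]

-- counting in a bucket expansion over distinct bucket labels
theorem count_flatMap_replicate (cs : List Int) (k : Int → Nat) (hnd : cs.Nodup) (v : Int) :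
    (cs.flatMap (fun c => List.replicate (k c) c)).count v = if v ∈ cs then k v else 0 := by
  induction cs with
  | nil => simp
  | cons c cs ih =>
    rcases List.nodup_cons.1 hnd with ⟨hc, hnd'⟩
    simp only [List.flatMap_cons, List.count_append, ih hnd', List.count_replicate,
      List.mem_cons]
    by_cases hv : v = c
    · subst hv; simp [hc]
    · simp [hv, Ne.symm hv]

-- the bucket expansion over a strictly decreasing label list is descending
theorem pairwise_ge_flatMap_replicate (cs : List Int) (k : Int → Nat)
    (h : cs.Pairwise (· > ·)) :
    (cs.flatMap (fun c => List.replicate (k c) c)).Pairwise (· ≥ ·) := by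
  induction cs with
  | nil => simp
  | cons c cs ih =>
    rcases List.pairwise_cons.1 h with ⟨hc, h'⟩
    simp only [List.flatMap_cons]
    refine List.pairwise_append.2 ⟨?_, ih h', ?_⟩
    · exact List.pairwise_replicate.2 (Or.inr le_rfl)
    · intro a ha b hb
      rcases List.mem_flatMap.1 hb with ⟨c', hc', hb'⟩
      rw [List.eq_of_mem_replicate ha, List.eq_of_mem_replicate hb']
      exact le_of_lt (hc c' hc')

-- two descending Int lists that are permutations of each other are equal
theorem desc_perm_eq (xs ys : List Int) (hperm : xs.Perm ys)
    (hxs : xs.Pairwise (· ≥ ·)) (hys : ys.Pairwise (· ≥ ·)) : xs = ys :=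
  hperm.eq_of_pairwise (fun _ _ _ _ h1 h2 => le_antisymm h2 h1) hxs hys

-- the counts of A's reverse-sorted pair list are the reverse-sorted count list
theorem map_fst_sorted_pairs (P : List (Int × String)) :
    (PySem.List.sorted P (fun p => toLex p) true).map Prod.fst
      = PySem.List.sorted (P.map Prod.fst) (fun c => c) true := by
  apply Eq.symm
  apply desc_perm_eq
  · exact (PySem.List.sorted_perm (P.map Prod.fst) (fun c => c) true).trans
      ((PySem.List.sorted_perm P (fun p => toLex p) true).map Prod.fst).symm
  · simpa using PySem.List.sorted_pairwise_rev (P.map Prod.fst) (fun c => c)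
  · have h := PySem.List.sorted_pairwise_rev P (fun p => toLex p)
    refine List.Pairwise.map Prod.fst ?_ h
    intro a b hab
    rcases Prod.Lex.le_iff.1 hab with h1 | ⟨h1, _⟩
    · exact le_of_lt h1
    · exact le_of_eq h1

theorem if_gt_eq_max (m c : Int) : (if c > m then c else m) = max m c := by
  rw [max_def]; split_ifs <;> omega

-- the countdown range is strictly decreasing and duplicate-free
theorem pyRange_neg_one_nodup (a b : Int) : (PySem.List.pyRange a b (-1)).Nodup := by
  rw [PySem.List.pyRange_neg_one_eq_reverse]
  exact (List.nodup_reverse).2 (PySem.List.nodup_pyRange_one _ _)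

theorem pyRange_neg_one_pairwise_gt (a b : Int) :
    (PySem.List.pyRange a b (-1)).Pairwise (· > ·) := by
  rw [PySem.List.pyRange_neg_one_eq_reverse]
  exact (List.pairwise_reverse).2 (PySem.List.pairwise_lt_pyRange_one _ _)

-- ===== VERDICT (by name: the statement is the Claim_ definition above) =====
theorem cumulative_frequency_spec : Claim_equal_cumulative_frequency := by
  intro text words_num _
  unfold Spec_cumulative_frequency cumulative_frequency cumulative_frequency_alt
  simp only [PySem.List.foldl_append_singleton_eq_map, List.nil_append,
    PySem.Dict.foldl_insert_getD_add_one_eq_counter]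
  set V := (PySem.Dict.counter text).values with hVdef
  have hV : V = (PySem.Set.ofList text).map (fun w => (List.count w text : Int)) := by
    simp [hVdef, PySem.Dict.values, PySem.Dict.items_counter, List.map_map, Function.comp_def]
  -- the second accumulator of B's histogram loop is the running maximum
  have hmax : V.foldl (fun m c => if c > m then c else m) 0 = V.foldl max 0 :=
    PySem.List.foldl_congr_mem V (fun m c => if c > m then c else m) max 0
      (fun m c _ => if_gt_eq_max m c)
  set maxc := V.foldl max 0 with hmaxc
  have hsplit : V.foldl
      (fun (st : PySem.Dict Int Int × Int) c =>
        (st.1.insert c (st.1.getD c 0 + 1), if c > st.2 then c else st.2))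
      (PySem.Dict.empty, (0 : Int)) = (PySem.Dict.counter V, maxc) := by
    rw [PySem.List.foldl_prod_mk (fun (d : PySem.Dict Int Int) c => d.insert c (d.getD c 0 + 1))
      (fun m c => if c > m then c else m) V PySem.Dict.empty 0,
      PySem.Dict.foldl_insert_getD_add_one_eq_counter, hmax, hmaxc]
  have hVpos : ∀ v ∈ V, 0 < v := by
    intro v hv
    rw [hV] at hv
    rcases List.mem_map.1 hv with ⟨w, hw, rfl⟩
    exact_mod_cast List.count_pos_iff.2 ((PySem.Set.mem_ofList text w).1 hw)
  have hVle : ∀ v ∈ V, v ≤ maxc := (PySem.List.le_foldl_max V 0).2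
  -- B's double loop expands the histogram into the descending count list
  set k : Int → Nat := fun c => ((PySem.Dict.counter V).getD c 0).toNat with hk
  set desc := (PySem.List.pyRange maxc 0 (-1)).flatMap (fun c => List.replicate (k c) c)
    with hdesc
  have hkc : ∀ v : Int, k v = V.count v := by
    intro v; simp [hk, PySem.Dict.getD_counter]
  have hperm : desc.Perm V := by
    rw [List.perm_iff_count]
    intro v
    rw [hdesc, count_flatMap_replicate _ _ (pyRange_neg_one_nodup _ _) v]
    by_cases hmem : v ∈ PySem.List.pyRange maxc 0 (-1)
    · rw [if_pos hmem, hkc]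
    · rw [if_neg hmem]
      have hv : v ∉ V := fun hvv =>
        hmem ((PySem.List.mem_pyRange_neg_one).2 ⟨hVpos v hvv, hVle v hvv⟩)
      exact (List.count_eq_zero.2 hv).symm
  have hsorted : desc = PySem.List.sorted V (fun c => c) true := by
    apply desc_perm_eq
    · exact hperm.trans (PySem.List.sorted_perm V (fun c => c) true).symm
    · exact pairwise_ge_flatMap_replicate _ _ (pyRange_neg_one_pairwise_gt _ _)
    · simpa using PySem.List.sorted_pairwise_rev V (fun c => c)
  -- reduce both sides to pvScan of the same descending list, then slice
  have hA : ((PySem.Set.ofList text).map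
        (fun w => ((PySem.List.count text w : Int), w))).map Prod.fst = V := by
    rw [hV]; simp [List.map_map, Function.comp_def, PySem.List.count]
  rw [pvScan_foldl_pairs, hsplit]
  dsimp only
  have hB : ((PySem.List.pyRange maxc 0 (-1)).foldl
      (fun (st : Int × List Int) c =>
        (PySem.List.pyRange 0 ((PySem.Dict.counter V).getD c 0) 1).foldl
          (fun (st2 : Int × List Int) _ => (st2.1 + c, st2.2 ++ [st2.1 + c])) st)
      ((0 : Int), ([] : List Int))).2 = pvScan 0 desc := by
    have hlen : ∀ c : Int, (PySem.List.pyRange 0 ((PySem.Dict.counter V).getD c 0) 1).length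
        = k c := by
      intro c; rw [PySem.List.length_pyRange_one]; simp [hk]
    calc ((PySem.List.pyRange maxc 0 (-1)).foldl
          (fun (st : Int × List Int) c =>
            (PySem.List.pyRange 0 ((PySem.Dict.counter V).getD c 0) 1).foldl
              (fun (st2 : Int × List Int) _ => (st2.1 + c, st2.2 ++ [st2.1 + c])) st)
          ((0 : Int), ([] : List Int))).2
        = ((PySem.List.pyRange maxc 0 (-1)).foldl
            (fun (st : Int × List Int) c =>
              (List.replicate (k c) c).foldl
                (fun (st2 : Int × List Int) c => (st2.1 + c, st2.2 ++ [st2.1 + c])) st)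
            ((0 : Int), ([] : List Int))).2 := by
          congr 1
          refine PySem.List.foldl_congr_mem _ _ _ _ ?_
          intro st c _
          rw [foldl_ignore_eq_replicate _ (fun (st2 : Int × List Int) c =>
            (st2.1 + c, st2.2 ++ [st2.1 + c])) c st, hlen c]
      _ = (desc.foldl (fun (st : Int × List Int) c => (st.1 + c, st.2 ++ [st.1 + c]))
            ((0 : Int), ([] : List Int))).2 := by
          rw [hdesc, foldl_block_flatMap]
      _ = pvScan 0 desc := by rw [pvScan_foldl_ints]; simp
  rw [hB, hsorted, map_fst_sorted_pairs, hA, List.nil_append]
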